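-- pv_equiv track=rewrite | github.com/richscottwill/agent-bridge | dashboards/export-projection-data.py | _build_region_banner
-- ===== SOURCE A (Python) =====
-- def _build_region_banner(constituents: list[str], summaries: list[str]) -> str:
--     """One-line banner. Example: 'MX US AU market-specific | CA UK DE FR IT ES JP regional fallback'."""
--     market_specific = [m for m, s in zip(constituents, summaries) if s == 'all_market_specific' or s == 'market_specific_with_cpc_derived']
--     some_fallback = [m for m, s in zip(constituents, summaries) if s == 'some_regional_fallback']
--     all_fallback = [m for m, s in zip(constituents, summaries) if s == 'all_regional_fallback']
--     parts = []
--     if market_specific: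
--         parts.append(f"{' '.join(market_specific)} market-specific")
--     if some_fallback:
--         parts.append(f"{' '.join(some_fallback)} mixed fallback")
--     if all_fallback:
--         parts.append(f"{' '.join(all_fallback)} regional fallback")
--     return ' | '.join(parts) or 'no data'
-- ===== SOURCE B (Python) =====
-- _CATEGORY = {
--     'all_market_specific': 0,
--     'market_specific_with_cpc_derived': 0,
--     'some_regional_fallback': 1,
--     'all_regional_fallback': 2,
-- }
--
-- _LABELS = ['market-specific', 'mixed fallback', 'regional fallback']
--
--
-- def _build_region_banner(constituents: list[str], summaries: list[str]) -> str:
--     buckets = [[], [], []]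
--     for m, s in zip(constituents, summaries):
--         k = _CATEGORY.get(s)
--         if k is not None:
--             buckets[k].append(m)
--     parts = [' '.join(b) + ' ' + lab for b, lab in zip(buckets, _LABELS) if b]
--     return ' | '.join(parts) or 'no data'
-- ===== Notes on version B (the rewrite author's own statement) =====
-- stated objective: simpler
-- what changed: Replaces A's three independent comprehension scans over zip(constituents, summaries) with a single table-routed pass: a summary->bucket-index dict routes each market into one of three accumulator lists, and the non-empty buckets are assembled with their labels in one zip pass.
import Mathlib
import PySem

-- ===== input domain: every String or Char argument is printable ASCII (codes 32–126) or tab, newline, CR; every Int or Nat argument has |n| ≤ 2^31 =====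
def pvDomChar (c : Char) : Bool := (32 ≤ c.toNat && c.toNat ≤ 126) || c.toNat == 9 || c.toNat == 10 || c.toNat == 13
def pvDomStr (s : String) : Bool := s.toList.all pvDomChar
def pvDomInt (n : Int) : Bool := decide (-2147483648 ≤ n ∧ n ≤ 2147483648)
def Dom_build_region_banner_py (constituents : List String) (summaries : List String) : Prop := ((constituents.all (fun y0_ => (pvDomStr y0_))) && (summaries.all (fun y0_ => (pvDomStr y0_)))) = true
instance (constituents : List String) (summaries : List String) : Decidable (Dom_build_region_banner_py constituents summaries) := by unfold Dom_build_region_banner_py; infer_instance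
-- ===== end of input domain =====

-- B replaces A's three independent scans over zip(constituents, summaries) by one table-routed pass
-- into three accumulator buckets (objective: simpler, one pass instead of three).

-- ===== PORT A =====
-- literal port of A: three filter comprehensions over zip, then conditional appends to `parts`.
-- `' | '.join(parts) or 'no data'` is ported as emptiness of `parts`: every part ends in a
-- non-empty literal, so the join is "" exactly when `parts` is empty.
def build_region_banner_py (constituents : List String) (summaries : List String) : String :=
  let z := constituents.zip summaries
  let market_specific := (z.filter (fun p => p.2 == "all_market_specific" || p.2 == "market_specific_with_cpc_derived")).map Prod.fst
  let some_fallback := (z.filter (fun p => p.2 == "some_regional_fallback")).map Prod.fst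
  let all_fallback := (z.filter (fun p => p.2 == "all_regional_fallback")).map Prod.fst
  let parts : List String := []
  let parts := if market_specific.isEmpty then parts else parts ++ [PySem.Str.join " " market_specific ++ " market-specific"]
  let parts := if some_fallback.isEmpty then parts else parts ++ [PySem.Str.join " " some_fallback ++ " mixed fallback"]
  let parts := if all_fallback.isEmpty then parts else parts ++ [PySem.Str.join " " all_fallback ++ " regional fallback"]
  if parts.isEmpty then "no data" else PySem.Str.join " | " parts

-- ===== PORT B =====
-- the summary -> bucket-index table (_CATEGORY in Source B)
def bannerCategory : PySem.Dict String Nat :=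
  PySem.Dict.ofList [("all_market_specific", 0), ("market_specific_with_cpc_derived", 0),
                     ("some_regional_fallback", 1), ("all_regional_fallback", 2)]

-- one loop iteration of Source B: route the market into the bucket the table names, if any
def bannerStep (b : List String × List String × List String) (p : String × String) :
    List String × List String × List String :=
  match PySem.Dict.get? bannerCategory p.2 with
  | some 0 => (b.1 ++ [p.1], b.2.1, b.2.2)
  | some 1 => (b.1, b.2.1 ++ [p.1], b.2.2)
  | some 2 => (b.1, b.2.1, b.2.2 ++ [p.1])
  | _ => b

def build_region_banner_py_alt (constituents : List String) (summaries : List String) : String :=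
  let buckets := (constituents.zip summaries).foldl bannerStep ([], [], [])
  let labeled := [(buckets.1, "market-specific"), (buckets.2.1, "mixed fallback"), (buckets.2.2, "regional fallback")]
  let parts := (labeled.filter (fun q => !q.1.isEmpty)).map (fun q => PySem.Str.join " " q.1 ++ " " ++ q.2)
  if parts.isEmpty then "no data" else PySem.Str.join " | " parts

-- ===== PRECONDITION & SPEC =====
def Spec_build_region_banner_py (constituents : List String) (summaries : List String) (out : String) : Prop := out = build_region_banner_py_alt constituents summaries
instance (constituents : List String) (summaries : List String) (out : String) : Decidable (Spec_build_region_banner_py constituents summaries out) := by unfold Spec_build_region_banner_py; infer_instance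

-- ===== CLAIM (what is proved, stated in full; the proofs are below) =====
def Claim_equal_build_region_banner_py : Prop := ∀ (constituents : List String) (summaries : List String), Dom_build_region_banner_py constituents summaries → Spec_build_region_banner_py constituents summaries (build_region_banner_py constituents summaries)

-- ===== LEMMAS AND PROOFS =====

-- the table lookup, characterised as A's three tests
theorem bannerCategory_get? (s : String) :
    PySem.Dict.get? bannerCategory s =
      if s == "all_market_specific" || s == "market_specific_with_cpc_derived" then some 0
      else if s == "some_regional_fallback" then some 1
      else if s == "all_regional_fallback" then some 2 else none := by
  simp [bannerCategory, PySem.Dict.get?, PySem.Dict.ofList, PySem.Dict.update, PySem.Dict.empty,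
        PySem.Dict.insert, PySem.Dict.contains]
  split_ifs with h1 h2 h3
  · rcases h1 with h | h <;> subst h <;> simp [List.find?]
  · subst h2; simp [List.find?]
  · subst h3; simp [List.find?]
  · have e1 : ("all_market_specific" == s) = false := by simp; exact fun h => h1 (Or.inl h.symm)
    have e2 : ("market_specific_with_cpc_derived" == s) = false := by simp; exact fun h => h1 (Or.inr h.symm)
    have e3 : ("some_regional_fallback" == s) = false := by simp; exact fun h => h2 h.symm
    have e4 : ("all_regional_fallback" == s) = false := by simp; exact fun h => h3 h.symm
    simp [List.find?, e1, e2, e3, e4]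

-- B's single pass produces exactly A's three filtered lists
theorem banner_fold (z : List (String × String)) (a b c : List String) :
    z.foldl bannerStep (a, b, c) =
      (a ++ (z.filter (fun p => p.2 == "all_market_specific" || p.2 == "market_specific_with_cpc_derived")).map Prod.fst,
       b ++ (z.filter (fun p => p.2 == "some_regional_fallback")).map Prod.fst,
       c ++ (z.filter (fun p => p.2 == "all_regional_fallback")).map Prod.fst) := by
  induction z generalizing a b c with
  | nil => simp
  | cons p t ih =>
    obtain ⟨m, s⟩ := p
    have hstep : bannerStep (a, b, c) (m, s) =
        (if s == "all_market_specific" || s == "market_specific_with_cpc_derived" then (a ++ [m], b, c)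
         else if s == "some_regional_fallback" then (a, b ++ [m], c)
         else if s == "all_regional_fallback" then (a, b, c ++ [m]) else (a, b, c)) := by
      simp only [bannerStep, bannerCategory_get?]
      split_ifs <;> rfl
    by_cases h1 : (s == "all_market_specific" || s == "market_specific_with_cpc_derived") = true
    · rcases (by simpa using h1 : s = "all_market_specific" ∨ s = "market_specific_with_cpc_derived") with h | h <;>
        subst h <;> simp [List.foldl_cons, hstep, ih]
    · by_cases h2 : (s == "some_regional_fallback") = true
      · have h : s = "some_regional_fallback" := by simpa using h2
        subst h
        simp [List.foldl_cons, hstep, ih]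
      · by_cases h3 : (s == "all_regional_fallback") = true
        · have h : s = "all_regional_fallback" := by simpa using h3
          subst h
          simp [List.foldl_cons, hstep, ih]
        · simp at h1 h2 h3
          simp [List.foldl_cons, hstep, h1, h2, h3, ih]

theorem lab1 (s : String) : s ++ " " ++ "market-specific" = s ++ " market-specific" := by
  rw [String.append_assoc]; congr 1
theorem lab2 (s : String) : s ++ " " ++ "mixed fallback" = s ++ " mixed fallback" := by
  rw [String.append_assoc]; congr 1
theorem lab3 (s : String) : s ++ " " ++ "regional fallback" = s ++ " regional fallback" := by
  rw [String.append_assoc]; congr 1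

-- given equal buckets, the two assemblies agree (case split on emptiness of each bucket)
theorem banner_assemble (ms sf af : List String) :
    (let parts : List String := []
     let parts := if ms.isEmpty then parts else parts ++ [PySem.Str.join " " ms ++ " market-specific"]
     let parts := if sf.isEmpty then parts else parts ++ [PySem.Str.join " " sf ++ " mixed fallback"]
     let parts := if af.isEmpty then parts else parts ++ [PySem.Str.join " " af ++ " regional fallback"]
     if parts.isEmpty then "no data" else PySem.Str.join " | " parts) =
    (let labeled := [(ms, "market-specific"), (sf, "mixed fallback"), (af, "regional fallback")]
     let parts := (labeled.filter (fun q => !q.1.isEmpty)).map (fun q => PySem.Str.join " " q.1 ++ " " ++ q.2)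
     if parts.isEmpty then "no data" else PySem.Str.join " | " parts) := by
  cases ms <;> cases sf <;> cases af <;>
    simp [List.filter, List.map, lab1, lab2, lab3]

-- ===== VERDICT (by name: the statement is the Claim_ definition above) =====
theorem build_region_banner_py_spec : Claim_equal_build_region_banner_py := by
  intro constituents summaries _
  unfold Spec_build_region_banner_py build_region_banner_py build_region_banner_py_alt
  rw [banner_fold]
  exact banner_assemble _ _ _
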